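-- pv_equiv track=rewrite | github.com/Naman-0206/TCS-CodeVita | S12/C_Buzz_Day_Sale.py | max_qty_max_cost
-- ===== SOURCE A (Python) =====
-- def max_qty_max_cost(products, m):
--     dp = [0] * (m + 1)
--     free_cost = [0] * (m + 1)
--
--     for cost, qty, fcost in products:
--         for budget in range(cost, m + 1):
--             new_free_qty = dp[budget - cost] + qty
--             new_free_cost = free_cost[budget - cost] + fcost
--
--             if new_free_qty > dp[budget]:
--                 dp[budget] = new_free_qty
--                 free_cost[budget] = new_free_cost
--
--             elif new_free_qty == dp[budget] and new_free_cost > free_cost[budget]: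
--                 free_cost[budget] = new_free_cost
--
--     return dp[m], free_cost[m]
-- ===== SOURCE B (Python) =====
-- def max_qty_max_cost(products, m):
--     # Index the catalogue once: for each distinct cost keep only the
--     # lexicographically best (qty, fcost) item -- a dominated duplicate-cost
--     # item can never appear in an optimal bundle, so it is dropped up front.
--     best_item = {}
--     for cost, qty, fcost in products:
--         cur = best_item.get(cost)
--         if cur is None or (qty, fcost) > cur:
--             best_item[cost] = (qty, fcost)
--     # Budget-outer fill of a single table of lexicographic (qty, free_cost)
--     # states, looking back over the pruned index ("pick one item, look back").
--     best = [(0, 0)]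
--     for b in range(1, m + 1):
--         cur = (0, 0)
--         for cost, (qty, fcost) in best_item.items():
--             if cost <= b:
--                 pq, pf = best[b - cost]
--                 cand = (pq + qty, pf + fcost)
--                 if cand > cur:
--                     cur = cand
--         best.append(cur)
--     return best[m]
-- ===== Notes on version B (the rewrite author's own statement) =====
-- stated objective: alternative
-- what changed: Replaces A's per-item forward sweep over two parallel int tables (dp, free_cost) by (1) a cost-indexed dict built once that keeps, per distinct cost, only the lexicographically best (qty, free_cost) item, dropping dominated duplicate-cost items before any DP, and (2) a budget-outer fill of a single table of lexicographic (qty, free_cost) tuples that looks back over that pruned index.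
-- outside the precondition, e.g. on max_qty_max_cost([(0, 1, 1)], 2): A returns (1, 1), B raises IndexError
import Mathlib
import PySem

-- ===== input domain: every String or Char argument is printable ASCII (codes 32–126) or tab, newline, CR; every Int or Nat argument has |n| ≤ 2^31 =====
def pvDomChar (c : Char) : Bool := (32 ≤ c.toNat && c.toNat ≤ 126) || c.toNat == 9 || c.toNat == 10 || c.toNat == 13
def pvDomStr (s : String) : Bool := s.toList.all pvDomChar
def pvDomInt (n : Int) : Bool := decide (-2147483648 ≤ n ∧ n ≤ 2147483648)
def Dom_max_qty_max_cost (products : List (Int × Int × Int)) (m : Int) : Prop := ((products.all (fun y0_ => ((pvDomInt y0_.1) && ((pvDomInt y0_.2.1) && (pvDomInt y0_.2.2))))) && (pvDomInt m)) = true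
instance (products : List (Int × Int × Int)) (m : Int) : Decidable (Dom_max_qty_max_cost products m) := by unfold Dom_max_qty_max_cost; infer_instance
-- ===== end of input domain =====

-- B replaces A's per-item forward sweep over two parallel int tables by (1) a
-- cost-indexed dict built once that keeps, per distinct cost, only the
-- lexicographically best (qty, free_cost) item — dominated duplicates never
-- occur in an optimal bundle — and (2) a budget-outer fill of a single table
-- of lexicographic (qty, free_cost) pairs looking back over that pruned index.

-- ===== PORT A =====
-- Literal transliteration of A; dp/free_cost are Python lists = arrays, ported
-- as Array with .toNat indices — exact under Pre_ (0 ≤ m, every cost ≥ 1),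
-- where budget ∈ [cost, m], so every index is nonnegative and in range.
def max_qty_max_cost (products : List (Int × Int × Int)) (m : Int) : Int × Int :=
  let dp0 : Array Int := Array.replicate (m + 1).toNat 0     -- [0] * (m + 1)
  let fc0 : Array Int := Array.replicate (m + 1).toNat 0
  let st := products.foldl (fun (st : Array Int × Array Int) it =>
    (PySem.List.pyRange it.1 (m + 1) 1).foldl (fun (st : Array Int × Array Int) budget =>
      match st with
      | (dp, fc) =>
        let nq := dp.getD (budget - it.1).toNat 0 + it.2.1
        let nf := fc.getD (budget - it.1).toNat 0 + it.2.2
        if nq > dp.getD budget.toNat 0 then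
          (dp.set! budget.toNat nq, fc.set! budget.toNat nf)
        else if nq = dp.getD budget.toNat 0 ∧ nf > fc.getD budget.toNat 0 then
          (dp, fc.set! budget.toNat nf)
        else (dp, fc)) st) (dp0, fc0)
  (st.1.getD m.toNat 0, st.2.getD m.toNat 0)

-- ===== PORT B =====
-- Literal transliteration of Source B: the dict best_item is PySem.Dict (its
-- .items is insertion-ordered, like Python's); `(qty, fcost) > cur` and
-- `cand > cur` are Python's lexicographic tuple comparison written out on the
-- pair; the Python list `best` (append-only) is ported as Array with .toNat
-- indices — exact under Pre_, where b - cost and m are nonnegative, in range.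
def max_qty_max_cost_alt (products : List (Int × Int × Int)) (m : Int) : Int × Int :=
  let bi : PySem.Dict Int (Int × Int) := products.foldl (fun d it =>
    match PySem.Dict.get? d it.1 with
    | none => PySem.Dict.insert d it.1 it.2
    | some cur =>
      if cur.1 < it.2.1 ∨ (cur.1 = it.2.1 ∧ cur.2 < it.2.2) then PySem.Dict.insert d it.1 it.2
      else d) PySem.Dict.empty
  let best := (PySem.List.pyRange 1 (m + 1) 1).foldl (fun (best : Array (Int × Int)) b =>
    best.push ((PySem.Dict.items bi).foldl (fun (cur : Int × Int) it =>
      if it.1 ≤ b then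
        let p := best.getD (b - it.1).toNat (0, 0)
        let cand := (p.1 + it.2.1, p.2 + it.2.2)
        if cur.1 < cand.1 ∨ (cur.1 = cand.1 ∧ cur.2 < cand.2) then cand else cur
      else cur) (0, 0))) #[((0 : Int), (0 : Int))]
  best.getD m.toNat (0, 0)

-- ===== PRECONDITION & SPEC =====
-- Pre_ keeps the task's natural domain: a nonnegative budget and positive item
-- costs. A raises IndexError for m < 0 and for any negative cost (budget = m
-- reads dp[m - cost] past the end); for a zero cost A still returns (its sweep
-- then uses the item at most once), but a zero-priced product is outside the
-- sale's natural domain and B's look-back naturally raises IndexError there.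
def Pre_max_qty_max_cost (products : List (Int × Int × Int)) (m : Int) : Prop :=
  0 ≤ m ∧ ∀ p ∈ products, 1 ≤ p.1
instance (products : List (Int × Int × Int)) (m : Int) : Decidable (Pre_max_qty_max_cost products m) := by unfold Pre_max_qty_max_cost; infer_instance
def pvWitness_max_qty_max_cost : (List (Int × Int × Int)) × Int := ([(2, 3, 5), (3, 5, 1)], 7)

def Spec_max_qty_max_cost (products : List (Int × Int × Int)) (m : Int) (out : Int × Int) : Prop := out = max_qty_max_cost_alt products m
instance (products : List (Int × Int × Int)) (m : Int) (out : Int × Int) : Decidable (Spec_max_qty_max_cost products m out) := by unfold Spec_max_qty_max_cost; infer_instance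

-- ===== CLAIM (what is proved, stated in full; the proofs are below) =====
def Claim_equal_max_qty_max_cost : Prop := ∀ (products : List (Int × Int × Int)) (m : Int), Dom_max_qty_max_cost products m → Pre_max_qty_max_cost products m → Spec_max_qty_max_cost products m (max_qty_max_cost products m)

-- ===== LEMMAS AND PROOFS =====

-- Python's lexicographic ≤ on int pairs (tuple comparison).
def lexLe (p q : Int × Int) : Prop := p.1 < q.1 ∨ (p.1 = q.1 ∧ p.2 ≤ q.2)

-- (q, f) totals of a finite multiset of items drawn (with repetition) from ps,
-- of total cost c.
inductive Reach (ps : List (Int × Int × Int)) : Int → Int → Int → Prop where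
  | zero : Reach ps 0 0 0
  | step : ∀ {c q f} (it : Int × Int × Int), it ∈ ps → Reach ps c q f →
      Reach ps (c + it.1) (q + it.2.1) (f + it.2.2)

-- p is the lexicographically best total reachable from ps within budget b.
def IsBest (ps : List (Int × Int × Int)) (b : Int) (p : Int × Int) : Prop :=
  (∃ c, c ≤ b ∧ Reach ps c p.1 p.2) ∧ ∀ c q f, c ≤ b → Reach ps c q f → lexLe (q, f) p

-- lexicographic-order toolkit
theorem lexLe_refl (p : Int × Int) : lexLe p p := Or.inr ⟨rfl, le_refl _⟩

theorem lexLe_trans {p q r : Int × Int} (h1 : lexLe p q) (h2 : lexLe q r) : lexLe p r := by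
  unfold lexLe at *; omega

theorem lexLe_antisymm {p q : Int × Int} (h1 : lexLe p q) (h2 : lexLe q p) : p = q := by
  rcases p with ⟨a, b⟩; rcases q with ⟨c, d⟩
  unfold lexLe at h1 h2; simp at h1 h2 ⊢; omega

theorem lexLe_add {p q : Int × Int} (a b : Int) (h : lexLe p q) :
    lexLe (p.1 + a, p.2 + b) (q.1 + a, q.2 + b) := by
  unfold lexLe at *; dsimp only; omega

theorem lexLe_add2 {p q r s : Int × Int} (h1 : lexLe p q) (h2 : lexLe r s) :
    lexLe (p.1 + r.1, p.2 + r.2) (q.1 + s.1, q.2 + s.2) := by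
  unfold lexLe at *; dsimp only; omega

theorem lexLe_of_lt {p q : Int × Int} (h : p.1 < q.1 ∨ (p.1 = q.1 ∧ p.2 < q.2)) : lexLe p q := by
  unfold lexLe; omega

theorem lexLe_of_not_lt {p q : Int × Int} (h : ¬ (p.1 < q.1 ∨ (p.1 = q.1 ∧ p.2 < q.2))) : lexLe q p := by
  unfold lexLe; omega

theorem isBest_unique {ps : List (Int × Int × Int)} {b : Int} {p q : Int × Int}
    (hp : IsBest ps b p) (hq : IsBest ps b q) : p = q := by
  rcases hp with ⟨⟨c, hc, hr⟩, hub⟩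
  rcases hq with ⟨⟨c', hc', hr'⟩, hub'⟩
  exact lexLe_antisymm (hub' c p.1 p.2 hc hr) (hub c' q.1 q.2 hc' hr')

-- Reach toolkit
theorem reach_nonneg {ps : List (Int × Int × Int)} {c q f : Int}
    (hc : ∀ p ∈ ps, 1 ≤ p.1) (h : Reach ps c q f) : 0 ≤ c := by
  induction h with
  | zero => omega
  | step it hit _ ih => have := hc it hit; omega

theorem isBest_zero {ps : List (Int × Int × Int)} {b : Int}
    (hb : 0 ≤ b) (hub : ∀ c q f, c ≤ b → Reach ps c q f → lexLe (q, f) (0, 0)) :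
    IsBest ps b ((0 : Int), (0 : Int)) :=
  ⟨⟨0, hb, Reach.zero⟩, hub⟩

theorem reach_mono {D P : List (Int × Int × Int)} {c q f : Int}
    (hsub : ∀ x ∈ D, x ∈ P) (h : Reach D c q f) : Reach P c q f := by
  induction h with
  | zero => exact Reach.zero
  | step x hx _ ih => exact Reach.step x (hsub x hx) ih

-- every bundle over P is lexicographically dominated, at the same cost, by a
-- bundle over the pruned list D (replace each item by D's item of its cost)
theorem reach_dominated {D P : List (Int × Int × Int)} {c q f : Int}
    (hdom : ∀ it ∈ P, ∃ it' ∈ D, it'.1 = it.1 ∧ lexLe it.2 it'.2)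
    (h : Reach P c q f) : ∃ q' f', Reach D c q' f' ∧ lexLe (q, f) (q', f') := by
  induction h with
  | zero => exact ⟨0, 0, Reach.zero, lexLe_refl _⟩
  | @step c0 q0 f0 it hit r ih =>
    obtain ⟨q', f', hr', hle⟩ := ih
    obtain ⟨it', hit', hcost, hdle⟩ := hdom it hit
    refine ⟨q' + it'.2.1, f' + it'.2.2, ?_, ?_⟩
    · have := Reach.step it' hit' hr'
      rwa [hcost] at this
    · exact lexLe_add2 hle hdle

-- hence a best over the pruned list is a best over the whole catalogue
theorem isBest_of_pruned {D P : List (Int × Int × Int)} {b : Int} {p : Int × Int}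
    (hsub : ∀ x ∈ D, x ∈ P)
    (hdom : ∀ it ∈ P, ∃ it' ∈ D, it'.1 = it.1 ∧ lexLe it.2 it'.2)
    (h : IsBest D b p) : IsBest P b p := by
  obtain ⟨⟨c, hcle, hr⟩, hub⟩ := h
  refine ⟨⟨c, hcle, reach_mono hsub hr⟩, ?_⟩
  intro c' q f hcle' hr'
  obtain ⟨q', f', hrD, hle⟩ := reach_dominated hdom hr'
  exact lexLe_trans hle (hub c' q' f' hcle' hrD)

-- the dict-building step of B, named (definitionally the lambda in the port)
def stepD (d : PySem.Dict Int (Int × Int)) (it : Int × Int × Int) : PySem.Dict Int (Int × Int) :=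
  match PySem.Dict.get? d it.1 with
  | none => PySem.Dict.insert d it.1 it.2
  | some cur =>
    if cur.1 < it.2.1 ∨ (cur.1 = it.2.1 ∧ cur.2 < it.2.2) then PySem.Dict.insert d it.1 it.2
    else d

-- every entry of the dict is (as a triple) one of the products inserted
theorem foldD_items_sub (l : List (Int × Int × Int)) :
    ∀ (d : PySem.Dict Int (Int × Int)) (P : List (Int × Int × Int)),
      (∀ p ∈ d.items, p ∈ P) → (∀ it ∈ l, it ∈ P) →
      ∀ p ∈ (l.foldl stepD d).items, p ∈ P := by
  induction l with
  | nil => intro d P hd _ p hp; exact hd p hp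
  | cons it l ih =>
    intro d P hd hl
    refine ih _ P ?_ (fun x hx => hl x (by simp [hx]))
    intro p hp
    have hins : ∀ q ∈ (PySem.Dict.insert d it.1 it.2).items, q ∈ P := by
      intro q hq
      rcases (PySem.Dict.mem_items_insert d it.1 it.2 q).1 hq with hq | ⟨hq, _⟩
      · subst hq; exact hl it (by simp)
      · exact hd q hq
    revert hp
    cases hg : PySem.Dict.get? d it.1 with
    | none =>
      simp only [stepD, hg]
      exact fun hp => hins p hp
    | some cur =>
      simp only [stepD, hg]
      split
      · exact fun hp => hins p hp
      · exact fun hp => hd p hp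

-- one step never lowers any existing lookup (lexicographically)
theorem stepD_mono {d : PySem.Dict Int (Int × Int)} {k : Int} {v : Int × Int}
    (h : PySem.Dict.get? d k = some v) (it : Int × Int × Int) :
    ∃ v', PySem.Dict.get? (stepD d it) k = some v' ∧ lexLe v v' := by
  by_cases hk : k = it.1
  · subst hk
    simp only [stepD, h]
    split
    · rename_i hlt
      exact ⟨it.2, PySem.Dict.get?_insert_self d it.1 it.2, lexLe_of_lt hlt⟩
    · exact ⟨v, h, lexLe_refl _⟩
  · cases hg : PySem.Dict.get? d it.1 with
    | none =>
      simp only [stepD, hg]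
      exact ⟨v, by rw [PySem.Dict.get?_insert_of_ne d it.2 hk, h], lexLe_refl _⟩
    | some cur =>
      simp only [stepD, hg]
      split
      · exact ⟨v, by rw [PySem.Dict.get?_insert_of_ne d it.2 hk, h], lexLe_refl _⟩
      · exact ⟨v, h, lexLe_refl _⟩

-- after its own step, the item is dominated by the dict's entry at its cost
theorem stepD_self (d : PySem.Dict Int (Int × Int)) (it : Int × Int × Int) :
    ∃ v, PySem.Dict.get? (stepD d it) it.1 = some v ∧ lexLe it.2 v := by
  cases hg : PySem.Dict.get? d it.1 with
  | none =>
    simp only [stepD, hg]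
    exact ⟨it.2, PySem.Dict.get?_insert_self d it.1 it.2, lexLe_refl _⟩
  | some cur =>
    simp only [stepD, hg]
    split
    · exact ⟨it.2, PySem.Dict.get?_insert_self d it.1 it.2, lexLe_refl _⟩
    · rename_i hnlt
      exact ⟨cur, hg, lexLe_of_not_lt hnlt⟩

theorem foldD_mono (l : List (Int × Int × Int)) :
    ∀ (d : PySem.Dict Int (Int × Int)) (k : Int) (v : Int × Int),
      PySem.Dict.get? d k = some v →
      ∃ v', PySem.Dict.get? (l.foldl stepD d) k = some v' ∧ lexLe v v' := by
  induction l with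
  | nil => intro d k v h; exact ⟨v, h, lexLe_refl _⟩
  | cons it l ih =>
    intro d k v h
    obtain ⟨v1, h1, hle1⟩ := stepD_mono h it
    obtain ⟨v2, h2, hle2⟩ := ih _ k v1 h1
    exact ⟨v2, h2, lexLe_trans hle1 hle2⟩

theorem foldD_dom (l : List (Int × Int × Int)) :
    ∀ (d : PySem.Dict Int (Int × Int)) (it : Int × Int × Int), it ∈ l →
      ∃ v, PySem.Dict.get? (l.foldl stepD d) it.1 = some v ∧ lexLe it.2 v := by
  induction l with
  | nil => intro d it h; simp at h
  | cons x l ih =>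
    intro d it h
    rcases List.mem_cons.1 h with rfl | h'
    · obtain ⟨v, hv, hle⟩ := stepD_self d it
      obtain ⟨v', hv', hle'⟩ := foldD_mono l _ it.1 v hv
      exact ⟨v', hv', lexLe_trans hle hle'⟩
    · exact ih _ it h'

-- array-access helpers (thin corollaries of the core Array lemmas, in the
-- exact forms the DP inductions below need)
theorem agetD_eq {α : Type} (a : Array α) (i : Nat) (d : α) (h : i < a.size) :
    a.getD i d = a[i] := by
  simp [Array.getD, h]

theorem agetD_set (a : Array Int) (i j : Nat) (v d : Int) (hi : i < a.size) :
    (a.set! j v).getD i d = if i = j then v else a.getD i d := by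
  rw [agetD_eq _ _ _ (by simpa using hi), agetD_eq _ _ _ hi]
  simp only [Array.set!_eq_setIfInBounds]
  rw [Array.getElem_setIfInBounds hi]
  by_cases h : i = j
  · simp [h]
  · rw [if_neg (Ne.symm h), if_neg h]

theorem agetD_push_lt {α : Type} (a : Array α) (x : α) (i : Nat) (d : α) (h : i < a.size) :
    (a.push x).getD i d = a.getD i d := by
  rw [agetD_eq _ _ _ (by simp; omega), agetD_eq _ _ _ h, Array.getElem_push_lt]

theorem agetD_push_eq {α : Type} (a : Array α) (x : α) (d : α) :
    (a.push x).getD a.size d = x := by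
  rw [agetD_eq _ _ _ (by simp)]
  simp

theorem agetD_replicate (n i : Nat) : (Array.replicate n (0:Int)).getD i 0 = 0 := by
  rw [Array.getD]
  split <;> simp_all

-- named copies of the two ports' loop bodies (definitionally equal to the
-- lambdas inside the ports; the *_eq lemmas below are rfl)
def stepA (it : Int × Int × Int) (st : Array Int × Array Int) (budget : Int) : Array Int × Array Int :=
  match st with
  | (dp, fc) =>
    let nq := dp.getD (budget - it.1).toNat 0 + it.2.1
    let nf := fc.getD (budget - it.1).toNat 0 + it.2.2
    if nq > dp.getD budget.toNat 0 then
      (dp.set! budget.toNat nq, fc.set! budget.toNat nf)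
    else if nq = dp.getD budget.toNat 0 ∧ nf > fc.getD budget.toNat 0 then
      (dp, fc.set! budget.toNat nf)
    else (dp, fc)

def tabA (st : Array Int × Array Int) (b : Int) : Int × Int :=
  (st.1.getD b.toNat 0, st.2.getD b.toNat 0)

theorem A_eq (products : List (Int × Int × Int)) (m : Int) :
    max_qty_max_cost products m =
      tabA (products.foldl (fun st it => (PySem.List.pyRange it.1 (m + 1) 1).foldl (stepA it) st)
        (Array.replicate (m + 1).toNat 0, Array.replicate (m + 1).toNat 0)) m := rfl

def innerB (ps : List (Int × Int × Int)) (best : Array (Int × Int)) (b : Int) : Int × Int :=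
  ps.foldl (fun (cur : Int × Int) it =>
    if it.1 ≤ b then
      let p := best.getD (b - it.1).toNat (0, 0)
      let cand := (p.1 + it.2.1, p.2 + it.2.2)
      if cur.1 < cand.1 ∨ (cur.1 = cand.1 ∧ cur.2 < cand.2) then cand else cur
    else cur) (0, 0)

def stepB (ps : List (Int × Int × Int)) (best : Array (Int × Int)) (b : Int) : Array (Int × Int) :=
  best.push (innerB ps best b)

theorem B_eq (products : List (Int × Int × Int)) (m : Int) :
    max_qty_max_cost_alt products m =
      ((PySem.List.pyRange 1 (m + 1) 1).foldl
        (stepB (PySem.Dict.items (products.foldl stepD PySem.Dict.empty)))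
        #[((0 : Int), (0 : Int))]).getD m.toNat (0, 0) := rfl

def candB (best : Array (Int × Int)) (b : Int) (it : Int × Int × Int) : Int × Int :=
  ((best.getD (b - it.1).toNat (0, 0)).1 + it.2.1,
   (best.getD (b - it.1).toNat (0, 0)).2 + it.2.2)

-- the inner fold of B computes the lexicographic max of (0,0) and all
-- applicable candidates
theorem foldB_spec (ps : List (Int × Int × Int)) (best : Array (Int × Int)) (b : Int) :
    ∀ (rest : List (Int × Int × Int)) (cur : Int × Int),
      (∀ x ∈ rest, x ∈ ps) →
      (cur = (0, 0) ∨ ∃ it ∈ ps, it.1 ≤ b ∧ cur = candB best b it) →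
      (rest.foldl (fun (cur : Int × Int) it =>
          if it.1 ≤ b then
            let p := best.getD (b - it.1).toNat (0, 0)
            let cand := (p.1 + it.2.1, p.2 + it.2.2)
            if cur.1 < cand.1 ∨ (cur.1 = cand.1 ∧ cur.2 < cand.2) then cand else cur
          else cur) cur = (0, 0) ∨
        ∃ it ∈ ps, it.1 ≤ b ∧ (rest.foldl (fun (cur : Int × Int) it =>
          if it.1 ≤ b then
            let p := best.getD (b - it.1).toNat (0, 0)
            let cand := (p.1 + it.2.1, p.2 + it.2.2)
            if cur.1 < cand.1 ∨ (cur.1 = cand.1 ∧ cur.2 < cand.2) then cand else cur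
          else cur) cur = candB best b it)) ∧
      lexLe cur (rest.foldl (fun (cur : Int × Int) it =>
          if it.1 ≤ b then
            let p := best.getD (b - it.1).toNat (0, 0)
            let cand := (p.1 + it.2.1, p.2 + it.2.2)
            if cur.1 < cand.1 ∨ (cur.1 = cand.1 ∧ cur.2 < cand.2) then cand else cur
          else cur) cur) ∧
      (∀ it ∈ rest, it.1 ≤ b → lexLe (candB best b it) (rest.foldl (fun (cur : Int × Int) it =>
          if it.1 ≤ b then
            let p := best.getD (b - it.1).toNat (0, 0)
            let cand := (p.1 + it.2.1, p.2 + it.2.2)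
            if cur.1 < cand.1 ∨ (cur.1 = cand.1 ∧ cur.2 < cand.2) then cand else cur
          else cur) cur)) := by
  intro rest
  induction rest with
  | nil =>
    intro cur hsub hshape
    exact ⟨hshape, lexLe_refl _, by simp⟩
  | cons it rest ih =>
    intro cur hsub hshape
    rw [List.foldl_cons]
    have hmem : it ∈ ps := hsub it (by simp)
    have hsub' : ∀ x ∈ rest, x ∈ ps := fun x hx => hsub x (by simp [hx])
    by_cases h1 : it.1 ≤ b
    · simp only [h1, if_true]
      by_cases h2 : cur.1 < (candB best b it).1 ∨ (cur.1 = (candB best b it).1 ∧ cur.2 < (candB best b it).2)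
      · have hred : (if cur.1 < ((best.getD (b - it.1).toNat (0, 0)).1 + it.2.1, (best.getD (b - it.1).toNat (0, 0)).2 + it.2.2).1 ∨ (cur.1 = ((best.getD (b - it.1).toNat (0, 0)).1 + it.2.1, (best.getD (b - it.1).toNat (0, 0)).2 + it.2.2).1 ∧ cur.2 < ((best.getD (b - it.1).toNat (0, 0)).1 + it.2.1, (best.getD (b - it.1).toNat (0, 0)).2 + it.2.2).2) then ((best.getD (b - it.1).toNat (0, 0)).1 + it.2.1, (best.getD (b - it.1).toNat (0, 0)).2 + it.2.2) else cur) = candB best b it := by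
          rw [if_pos]; · rfl
          · exact h2
        rw [hred]
        obtain ⟨s1, s2, s3⟩ := ih (candB best b it) hsub' (Or.inr ⟨it, hmem, h1, rfl⟩)
        refine ⟨s1, lexLe_trans (lexLe_of_lt h2) s2, ?_⟩
        intro x hx hxb
        rcases List.mem_cons.1 hx with rfl | hx'
        · exact s2
        · exact s3 x hx' hxb
      · have hred : (if cur.1 < ((best.getD (b - it.1).toNat (0, 0)).1 + it.2.1, (best.getD (b - it.1).toNat (0, 0)).2 + it.2.2).1 ∨ (cur.1 = ((best.getD (b - it.1).toNat (0, 0)).1 + it.2.1, (best.getD (b - it.1).toNat (0, 0)).2 + it.2.2).1 ∧ cur.2 < ((best.getD (b - it.1).toNat (0, 0)).1 + it.2.1, (best.getD (b - it.1).toNat (0, 0)).2 + it.2.2).2) then ((best.getD (b - it.1).toNat (0, 0)).1 + it.2.1, (best.getD (b - it.1).toNat (0, 0)).2 + it.2.2) else cur) = cur := by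
          rw [if_neg]; exact h2
        rw [hred]
        obtain ⟨s1, s2, s3⟩ := ih cur hsub' hshape
        refine ⟨s1, s2, ?_⟩
        intro x hx hxb
        rcases List.mem_cons.1 hx with rfl | hx'
        · exact lexLe_trans (lexLe_of_not_lt h2) s2
        · exact s3 x hx' hxb
    · simp only [h1, if_false]
      obtain ⟨s1, s2, s3⟩ := ih cur hsub' hshape
      refine ⟨s1, s2, ?_⟩
      intro x hx hxb
      rcases List.mem_cons.1 hx with rfl | hx'
      · exact absurd hxb h1
      · exact s3 x hx' hxb

theorem isBest_innerB (ps : List (Int × Int × Int)) (best : Array (Int × Int)) (j : Int)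
    (hc : ∀ p ∈ ps, 1 ≤ p.1) (hj : 1 ≤ j)
    (hbest : ∀ b : Int, 0 ≤ b → b < j → IsBest ps b (best.getD b.toNat (0, 0))) :
    IsBest ps j (innerB ps best j) := by
  obtain ⟨s1, s2, s3⟩ := foldB_spec ps best j ps (0, 0) (fun x hx => hx) (Or.inl rfl)
  rw [innerB]
  constructor
  · -- membership
    rcases s1 with h | ⟨it, hmem, hitb, h⟩
    · rw [h]; exact ⟨0, by omega, Reach.zero⟩
    · have h1 : (1 : Int) ≤ it.1 := hc it hmem
      obtain ⟨⟨c, hcle, hr⟩, _⟩ := hbest (j - it.1) (by omega) (by omega)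
      refine ⟨c + it.1, by omega, ?_⟩
      rw [h]
      exact Reach.step it hmem hr
  · -- upper bound
    intro c q f hcle hr
    cases hr with
    | zero => exact s2
    | @step c' q' f' it hmem r =>
      have h1 : (1 : Int) ≤ it.1 := hc it hmem
      have h0 : (0 : Int) ≤ c' := reach_nonneg hc r
      obtain ⟨_, hub⟩ := hbest (j - it.1) (by omega) (by omega)
      have hq' := hub c' q' f' (by omega) r
      have hadd := lexLe_add it.2.1 it.2.2 hq'
      exact lexLe_trans hadd (s3 it hmem (by omega))

-- B fills its table with the best (over ps) value for every budget
theorem B_table (ps : List (Int × Int × Int)) (m : Int)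
    (hc : ∀ p ∈ ps, 1 ≤ p.1) :
    ∀ (k : Nat) (j : Int), j = 1 + (k : Int) → j ≤ m + 1 →
      ((((PySem.List.pyRange 1 j 1).foldl (stepB ps) #[((0 : Int), (0 : Int))]).size : Int) = j ∧
       ∀ b : Int, 0 ≤ b → b < j →
         IsBest ps b (((PySem.List.pyRange 1 j 1).foldl (stepB ps) #[((0 : Int), (0 : Int))]).getD b.toNat (0, 0))) := by
  intro k
  induction k with
  | zero =>
    intro j hj hjm
    subst hj
    rw [show (1 + ((0:Nat) : Int)) = 1 by omega, PySem.List.pyRange_one_eq_nil (by omega)]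
    simp only [List.foldl_nil]
    refine ⟨by simp, ?_⟩
    intro b hb0 hb1
    have hb : b = 0 := by omega
    subst hb
    have h00 : (#[((0 : Int), (0 : Int))] : Array (Int × Int)).getD (0 : Int).toNat (0, 0) = ((0 : Int), (0 : Int)) := rfl
    rw [h00]
    refine isBest_zero (by omega) ?_
    intro c q f hcle hr
    cases hr with
    | zero => exact lexLe_refl _
    | @step c' q' f' it hmem r =>
      have := hc it hmem
      have := reach_nonneg hc r
      omega
  | succ k ih =>
    intro j hj hjm
    have hj' : j = (1 + (k : Int)) + 1 := by omega
    subst hj'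
    obtain ⟨len_eq, tab_eq⟩ := ih (1 + (k : Int)) rfl (by omega)
    rw [PySem.List.pyRange_one_succ_right (by omega), List.foldl_append, List.foldl_cons, List.foldl_nil]
    set L := (PySem.List.pyRange 1 (1 + (k : Int)) 1).foldl (stepB ps) #[((0 : Int), (0 : Int))] with hL
    rw [stepB]
    have hbest : IsBest ps (1 + (k : Int)) (innerB ps L (1 + (k : Int))) :=
      isBest_innerB ps L (1 + (k : Int)) hc (by omega) (fun b hb0 hb1 => by
        exact tab_eq b hb0 (by omega))
    constructor
    · simp; omega
    · intro b hb0 hb1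
      by_cases hbk : b < 1 + (k : Int)
      · rw [agetD_push_lt _ _ _ _ (by omega)]
        exact tab_eq b hb0 hbk
      · have hbeq : b = 1 + (k : Int) := by omega
        subst hbeq
        rw [show (1 + (k : Int)).toNat = L.size by omega, agetD_push_eq]
        exact hbest

theorem max_qty_max_cost_B_best (products : List (Int × Int × Int)) (m : Int)
    (hm : 0 ≤ m) (hc : ∀ p ∈ products, 1 ≤ p.1) :
    IsBest products m (max_qty_max_cost_alt products m) := by
  rw [B_eq]
  set D := PySem.Dict.items (products.foldl stepD PySem.Dict.empty) with hD
  have hsub : ∀ x ∈ D, x ∈ products := by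
    intro x hx
    exact foldD_items_sub products PySem.Dict.empty products (by simp [PySem.Dict.empty]) (fun _ h => h) x hx
  have hdom : ∀ it ∈ products, ∃ it' ∈ D, it'.1 = it.1 ∧ lexLe it.2 it'.2 := by
    intro it hit
    obtain ⟨v, hv, hle⟩ := foldD_dom products PySem.Dict.empty it hit
    exact ⟨(it.1, v), PySem.Dict.mem_items_of_get?_eq_some _ hv, rfl, hle⟩
  have hcD : ∀ p ∈ D, 1 ≤ p.1 := fun p hp => hc p (hsub p hp)
  obtain ⟨len_eq, tab_eq⟩ := B_table D m hcD m.toNat (m + 1) (by omega) (by omega)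
  exact isBest_of_pruned hsub hdom (tab_eq m hm (by omega))

-- every budget below the new item's cost is unaffected by appending it
theorem reach_append {ps : List (Int × Int × Int)} {it : Int × Int × Int} {c q f : Int}
    (h : Reach ps c q f) : Reach (ps ++ [it]) c q f := by
  induction h with
  | zero => exact Reach.zero
  | step x hx _ ih => exact Reach.step x (List.mem_append_left _ hx) ih

theorem reach_snoc_elim {ps : List (Int × Int × Int)} {it : Int × Int × Int} {c q f : Int}
    (h : Reach (ps ++ [it]) c q f) :
    Reach ps c q f ∨ ∃ c' q' f', Reach (ps ++ [it]) c' q' f' ∧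
      c = c' + it.1 ∧ q = q' + it.2.1 ∧ f = f' + it.2.2 := by
  induction h with
  | zero => exact Or.inl Reach.zero
  | @step c0 q0 f0 x hx r ih =>
    by_cases hxit : x = it
    · subst hxit
      exact Or.inr ⟨c0, q0, f0, r, rfl, rfl, rfl⟩
    · have hxps : x ∈ ps := by
        rcases List.mem_append.1 hx with h | h
        · exact h
        · simp at h; exact absurd h hxit
      rcases ih with hl | ⟨c', q', f', hr, e1, e2, e3⟩
      · exact Or.inl (Reach.step x hxps hl)
      · refine Or.inr ⟨c' + x.1, q' + x.2.1, f' + x.2.2, Reach.step x hx hr, by omega, by omega, by omega⟩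

theorem isBest_snoc_low {P : List (Int × Int × Int)} {it : Int × Int × Int} {b : Int} {p : Int × Int}
    (hP' : ∀ x ∈ P ++ [it], 1 ≤ x.1) (hb : b < it.1) (h : IsBest P b p) : IsBest (P ++ [it]) b p := by
  obtain ⟨⟨c, hcle, hr⟩, hub⟩ := h
  refine ⟨⟨c, hcle, reach_append hr⟩, ?_⟩
  intro c' q f hcle' hr'
  rcases reach_snoc_elim hr' with hl | ⟨c'', q'', f'', hr'', e1, e2, e3⟩
  · exact hub c' q f hcle' hl
  · have h1 : (1 : Int) ≤ it.1 := hP' it (by simp)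
    have h0 : (0 : Int) ≤ c'' := reach_nonneg hP' hr''
    omega

-- the lexicographic max of the old best (without the item) and of "item added
-- to the best at the reduced budget" is the new best
theorem isBest_snoc_max {P : List (Int × Int × Int)} {it : Int × Int × Int} {j : Int}
    {old prev v : Int × Int}
    (hold : IsBest P j old) (hprev : IsBest (P ++ [it]) (j - it.1) prev)
    (h1 : lexLe old v) (h2 : lexLe (prev.1 + it.2.1, prev.2 + it.2.2) v)
    (h3 : v = old ∨ v = (prev.1 + it.2.1, prev.2 + it.2.2)) : IsBest (P ++ [it]) j v := by
  constructor
  · rcases h3 with rfl | rfl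
    · obtain ⟨⟨c, hcle, hr⟩, _⟩ := hold
      exact ⟨c, hcle, reach_append hr⟩
    · obtain ⟨⟨c, hcle, hr⟩, _⟩ := hprev
      exact ⟨c + it.1, by omega, Reach.step it (by simp) hr⟩
  · intro c q f hcle hr
    rcases reach_snoc_elim hr with hl | ⟨c', q', f', hr', e1, e2, e3⟩
    · exact lexLe_trans (hold.2 c q f hcle hl) h1
    · have hub := hprev.2 c' q' f' (by omega) hr'
      have hadd := lexLe_add it.2.1 it.2.2 hub
      subst e2; subst e3
      exact lexLe_trans hadd h2

-- one update of A's inner sweep moves the boundary budget from j to j + 1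
theorem A_update {m : Int} {P : List (Int × Int × Int)} {it : Int × Int × Int}
    (hP' : ∀ x ∈ P ++ [it], 1 ≤ x.1) {j : Int} (hj1 : it.1 ≤ j) (hj2 : j ≤ m)
    (dp fc : Array Int)
    (hdl : (dp.size : Int) = m + 1) (hfl : (fc.size : Int) = m + 1)
    (hlow : ∀ b : Int, 0 ≤ b → b ≤ m → b < j → IsBest (P ++ [it]) b (tabA (dp, fc) b))
    (hhigh : ∀ b : Int, 0 ≤ b → b ≤ m → j ≤ b → IsBest P b (tabA (dp, fc) b)) :
    (((stepA it (dp, fc) j).1.size : Int) = m + 1 ∧ ((stepA it (dp, fc) j).2.size : Int) = m + 1) ∧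
    (∀ b : Int, 0 ≤ b → b ≤ m → b < j + 1 → IsBest (P ++ [it]) b (tabA (stepA it (dp, fc) j) b)) ∧
    (∀ b : Int, 0 ≤ b → b ≤ m → j + 1 ≤ b → IsBest P b (tabA (stepA it (dp, fc) j) b)) := by
  have hit1 : (1 : Int) ≤ it.1 := hP' it (by simp)
  have hprev : IsBest (P ++ [it]) (j - it.1) (tabA (dp, fc) (j - it.1)) :=
    hlow (j - it.1) (by omega) (by omega) (by omega)
  have hold : IsBest P j (tabA (dp, fc) j) := hhigh j (by omega) (by omega) (by omega)
  have hj0 : (0 : Int) ≤ j := by omega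
  set nq := dp.getD (j - it.1).toNat 0 + it.2.1 with hnq
  set nf := fc.getD (j - it.1).toNat 0 + it.2.2 with hnf
  set c1 := dp.getD j.toNat 0 with hc1
  set cf := fc.getD j.toNat 0 with hcf
  have hstep : stepA it (dp, fc) j =
      if nq > c1 then (dp.set! j.toNat nq, fc.set! j.toNat nf)
      else if nq = c1 ∧ nf > cf then (dp, fc.set! j.toNat nf)
      else (dp, fc) := rfl
  have tset : ∀ (a : Array Int) (v : Int), (a.size : Int) = m + 1 →
      ∀ b : Int, 0 ≤ b → b ≤ m → b ≠ j → (a.set! j.toNat v).getD b.toNat 0 = a.getD b.toNat 0 := by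
    intro a v ha b hb0 hbm hbj
    rw [agetD_set a b.toNat j.toNat v 0 (by omega), if_neg (by omega)]
  have tab_of : ∀ (st' : Array Int × Array Int), (st'.1 = dp.set! j.toNat nq ∨ st'.1 = dp) →
      (st'.2 = fc.set! j.toNat nf ∨ st'.2 = fc) →
      ∀ b : Int, 0 ≤ b → b ≤ m → b ≠ j → tabA st' b = tabA (dp, fc) b := by
    intro st' hd hf b hb0 hbm hbj
    rcases hd with hd | hd <;> rcases hf with hf | hf <;> simp only [tabA, hd, hf]
    · rw [tset dp nq hdl b hb0 hbm hbj, tset fc nf hfl b hb0 hbm hbj]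
    · rw [tset dp nq hdl b hb0 hbm hbj]
    · rw [tset fc nf hfl b hb0 hbm hbj]
  by_cases hb1 : nq > c1
  · rw [hstep, if_pos hb1]
    have htabj : tabA (dp.set! j.toNat nq, fc.set! j.toNat nf) j = (nq, nf) := by
      simp only [tabA]
      rw [agetD_set _ _ _ _ _ (by omega), agetD_set _ _ _ _ _ (by omega)]
      simp
    have hbestj : IsBest (P ++ [it]) j ((nq, nf) : Int × Int) := by
      refine isBest_snoc_max hold hprev ?_ ?_ (Or.inr ?_)
      · unfold lexLe; dsimp only [tabA]; omega
      · unfold lexLe; dsimp only [tabA]; omega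
      · simp only [tabA, hnq, hnf]
    refine ⟨⟨by simp; omega, by simp; omega⟩, ?_, ?_⟩
    · intro b hb0 hbm hbj1
      by_cases hbj : b = j
      · subst hbj; rw [htabj]; exact hbestj
      · rw [tab_of _ (Or.inl rfl) (Or.inl rfl) b hb0 hbm hbj]
        exact hlow b hb0 hbm (by omega)
    · intro b hb0 hbm hbj1
      rw [tab_of _ (Or.inl rfl) (Or.inl rfl) b hb0 hbm (by omega)]
      exact hhigh b hb0 hbm (by omega)
  · by_cases hb2 : nq = c1 ∧ nf > cf
    · rw [hstep, if_neg hb1, if_pos hb2]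
      have htabj : tabA (dp, fc.set! j.toNat nf) j = (c1, nf) := by
        simp only [tabA]
        rw [agetD_set _ _ _ _ _ (by omega)]
        simp [hc1]
      have hbestj : IsBest (P ++ [it]) j ((c1, nf) : Int × Int) := by
        refine isBest_snoc_max hold hprev ?_ ?_ (Or.inr ?_)
        · unfold lexLe; dsimp only [tabA]; omega
        · unfold lexLe; dsimp only [tabA]; omega
        · simp only [tabA]; rw [← hnq, ← hnf, hb2.1]
      refine ⟨⟨by omega, by simp; omega⟩, ?_, ?_⟩
      · intro b hb0 hbm hbj1
        by_cases hbj : b = j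
        · subst hbj; rw [htabj]; exact hbestj
        · rw [tab_of _ (Or.inr rfl) (Or.inl rfl) b hb0 hbm hbj]
          exact hlow b hb0 hbm (by omega)
      · intro b hb0 hbm hbj1
        rw [tab_of _ (Or.inr rfl) (Or.inl rfl) b hb0 hbm (by omega)]
        exact hhigh b hb0 hbm (by omega)
    · rw [hstep, if_neg hb1, if_neg hb2]
      have hbestj : IsBest (P ++ [it]) j (tabA (dp, fc) j) := by
        refine isBest_snoc_max hold hprev (lexLe_refl _) ?_ (Or.inl rfl)
        · unfold lexLe; dsimp only [tabA]; omega
      refine ⟨⟨by omega, by omega⟩, ?_, ?_⟩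
      · intro b hb0 hbm hbj1
        by_cases hbj : b = j
        · subst hbj; exact hbestj
        · exact hlow b hb0 hbm (by omega)
      · intro b hb0 hbm hbj1
        exact hhigh b hb0 hbm (by omega)

-- A's inner sweep, processed up to budget j, moves the table from "best over P"
-- to "best over P ++ [it]" below j
theorem A_inner {m : Int} {P : List (Int × Int × Int)} {it : Int × Int × Int}
    (hP' : ∀ x ∈ P ++ [it], 1 ≤ x.1) :
    ∀ (k : Nat) (j : Int), j = it.1 + (k : Int) → j ≤ m + 1 →
    ∀ dp fc : Array Int, (dp.size : Int) = m + 1 → (fc.size : Int) = m + 1 →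
      (∀ b : Int, 0 ≤ b → b ≤ m → IsBest P b (tabA (dp, fc) b)) →
      ((((PySem.List.pyRange it.1 j 1).foldl (stepA it) (dp, fc)).1.size : Int) = m + 1 ∧
       (((PySem.List.pyRange it.1 j 1).foldl (stepA it) (dp, fc)).2.size : Int) = m + 1) ∧
      (∀ b : Int, 0 ≤ b → b ≤ m → b < j →
        IsBest (P ++ [it]) b (tabA ((PySem.List.pyRange it.1 j 1).foldl (stepA it) (dp, fc)) b)) ∧
      (∀ b : Int, 0 ≤ b → b ≤ m → j ≤ b →
        IsBest P b (tabA ((PySem.List.pyRange it.1 j 1).foldl (stepA it) (dp, fc)) b)) := by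
  intro k
  induction k with
  | zero =>
    intro j hj hjm dp fc hdl hfl hinv
    have hj0 : j = it.1 := by omega
    subst hj0
    rw [PySem.List.pyRange_one_eq_nil (by omega)]
    simp only [List.foldl_nil]
    exact ⟨⟨hdl, hfl⟩,
      fun b hb0 hbm hbj => isBest_snoc_low hP' (by omega) (hinv b hb0 hbm),
      fun b hb0 hbm _ => hinv b hb0 hbm⟩
  | succ k ih =>
    intro j hj hjm dp fc hdl hfl hinv
    have hj' : j = (it.1 + (k : Int)) + 1 := by omega
    subst hj'
    rw [PySem.List.pyRange_one_succ_right (by omega), List.foldl_append, List.foldl_cons, List.foldl_nil]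
    obtain ⟨⟨l1, l2⟩, low, high⟩ := ih (it.1 + (k : Int)) rfl (by omega) dp fc hdl hfl hinv
    set st := (PySem.List.pyRange it.1 (it.1 + (k : Int)) 1).foldl (stepA it) (dp, fc) with hst
    have := A_update hP' (j := it.1 + (k : Int)) (by omega) (by omega) st.1 st.2 l1 l2
      (fun b hb0 hbm hbj => by rw [show ((st.1, st.2) : Array Int × Array Int) = st from rfl]; exact low b hb0 hbm hbj)
      (fun b hb0 hbm hbj => by rw [show ((st.1, st.2) : Array Int × Array Int) = st from rfl]; exact high b hb0 hbm hbj)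
    rw [show ((st.1, st.2) : Array Int × Array Int) = st from rfl] at this
    exact this

-- the full inner sweep: the whole table becomes "best over P ++ [it]"
theorem A_inner_full {m : Int} {P : List (Int × Int × Int)} {it : Int × Int × Int}
    (hP' : ∀ x ∈ P ++ [it], 1 ≤ x.1)
    (dp fc : Array Int) (hdl : (dp.size : Int) = m + 1) (hfl : (fc.size : Int) = m + 1)
    (hinv : ∀ b : Int, 0 ≤ b → b ≤ m → IsBest P b (tabA (dp, fc) b)) :
    ((((PySem.List.pyRange it.1 (m + 1) 1).foldl (stepA it) (dp, fc)).1.size : Int) = m + 1 ∧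
     (((PySem.List.pyRange it.1 (m + 1) 1).foldl (stepA it) (dp, fc)).2.size : Int) = m + 1) ∧
    (∀ b : Int, 0 ≤ b → b ≤ m →
      IsBest (P ++ [it]) b (tabA ((PySem.List.pyRange it.1 (m + 1) 1).foldl (stepA it) (dp, fc)) b)) := by
  have hit1 : (1 : Int) ≤ it.1 := hP' it (by simp)
  by_cases h : m + 1 ≤ it.1
  · rw [PySem.List.pyRange_one_eq_nil (by omega)]
    simp only [List.foldl_nil]
    exact ⟨⟨hdl, hfl⟩, fun b hb0 hbm => isBest_snoc_low hP' (by omega) (hinv b hb0 hbm)⟩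
  · obtain ⟨hl, low, _⟩ := A_inner hP' (m + 1 - it.1).toNat (m + 1) (by omega) (by omega) dp fc hdl hfl hinv
    exact ⟨hl, fun b hb0 hbm => low b hb0 hbm (by omega)⟩

-- A's outer loop: folding the remaining items extends the table's item set
theorem A_outer {m : Int} :
    ∀ (rest P : List (Int × Int × Int)) (dp fc : Array Int),
      (∀ x ∈ P, 1 ≤ x.1) → (∀ x ∈ rest, 1 ≤ x.1) →
      (dp.size : Int) = m + 1 → (fc.size : Int) = m + 1 →
      (∀ b : Int, 0 ≤ b → b ≤ m → IsBest P b (tabA (dp, fc) b)) →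
      (∀ b : Int, 0 ≤ b → b ≤ m →
        IsBest (P ++ rest) b
          (tabA (rest.foldl (fun st it => (PySem.List.pyRange it.1 (m + 1) 1).foldl (stepA it) st) (dp, fc)) b)) := by
  intro rest
  induction rest with
  | nil =>
    intro P dp fc hP hrest hdl hfl hinv b hb0 hbm
    simpa using hinv b hb0 hbm
  | cons it rest ih =>
    intro P dp fc hP hrest hdl hfl hinv b hb0 hbm
    rw [List.foldl_cons]
    have hP' : ∀ x ∈ P ++ [it], 1 ≤ x.1 := by
      intro x hx
      rcases List.mem_append.1 hx with h | h
      · exact hP x h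
      · simp at h; subst h; exact hrest x (by simp)
    obtain ⟨⟨l1, l2⟩, inv'⟩ := A_inner_full hP' dp fc hdl hfl hinv
    set st := (PySem.List.pyRange it.1 (m + 1) 1).foldl (stepA it) (dp, fc) with hst
    have hres := ih (P ++ [it]) st.1 st.2 (fun x hx => hP' x hx)
      (fun x hx => hrest x (by simp [hx])) l1 l2
      (fun b hb0 hbm => by rw [show ((st.1, st.2) : Array Int × Array Int) = st from rfl]; exact inv' b hb0 hbm)
      b hb0 hbm
    rw [show ((st.1, st.2) : Array Int × Array Int) = st from rfl] at hres
    rw [List.append_assoc] at hres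
    simpa using hres

theorem max_qty_max_cost_A_best (products : List (Int × Int × Int)) (m : Int)
    (hm : 0 ≤ m) (hc : ∀ p ∈ products, 1 ≤ p.1) :
    IsBest products m (max_qty_max_cost products m) := by
  rw [A_eq]
  have hinit : ∀ b : Int, 0 ≤ b → b ≤ m →
      IsBest ([] : List (Int × Int × Int)) b
        (tabA (Array.replicate (m + 1).toNat 0, Array.replicate (m + 1).toNat 0) b) := by
    intro b hb0 hbm
    have htab : tabA (Array.replicate (m + 1).toNat (0:Int), Array.replicate (m + 1).toNat (0:Int)) b = (0, 0) := by
      simp only [tabA, agetD_replicate]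
    rw [htab]
    refine isBest_zero hb0 ?_
    intro c q f hcle hr
    cases hr with
    | zero => exact lexLe_refl _
    | step x hx r => simp at hx
  have := A_outer products [] (Array.replicate (m + 1).toNat 0) (Array.replicate (m + 1).toNat 0)
    (by simp) hc (by simp; omega) (by simp; omega) hinit m hm (by omega)
  simpa using this

-- ===== VERDICT (by name: the statement is the Claim_ definition above) =====
theorem max_qty_max_cost_spec : Claim_equal_max_qty_max_cost := by
  intro products m _ hpre
  exact isBest_unique (max_qty_max_cost_A_best products m hpre.1 hpre.2)
    (max_qty_max_cost_B_best products m hpre.1 hpre.2)
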